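-- pv_equiv track=rewrite | github.com/LucasKiesel/Near-Duplicate_Table_Detection | utils.py | remove_subsets
-- ===== SOURCE A (Python) =====
-- def remove_subsets(l:list)->list:
--     '''Returns a list of sets, where each set is the biggest variant present.
--     The input list needs to be a list of sets.'''
--     result = l.copy()
--
--     backToWhileLoop = True
--
--     while(len(result) != 0 and backToWhileLoop):
--
--         backToWhileLoop = False
--
--         for i in range(len(result)):
--             for j in range(i+1, len(result)):
--                 set1:set = result[i]
--                 set2:set = result[j]
--
--                 if(set1 == set2):
--                     result.pop(j)
--                     backToWhileLoop = True
--                     break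
--
--                 if(len(set1) < len(set2) and set1.issubset(set2)):
--                     result.pop(i)
--                     backToWhileLoop = True
--                     break
--
--                 elif(len(set1) > len(set2) and set2.issubset(set1)):
--                     result.pop(j)
--                     backToWhileLoop = True
--                     break
--
--             # break to while loop
--             if(backToWhileLoop): break
--
--     return result
-- ===== SOURCE B (Python) =====
-- def remove_subsets(l: list) -> list:
--     '''Returns a list of sets, where each set is the biggest variant present.
--     The input list needs to be a list of sets.'''
--     result = []
--     seen = []
--     for s in l:
--         if any(len(s) < len(t) and s.issubset(t) for t in l) or \
--            any(s == t for t in seen):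
--             pass
--         else:
--             result.append(s)
--         seen.append(s)
--     return result
-- ===== Notes on version B (the rewrite author's own statement) =====
-- stated objective: faster
-- what changed: A repeatedly rescans all pairs and restarts the whole double scan after every single removal; B makes one pass, keeping a set unless it is a proper subset of some set in the list or equal to an earlier set; Pre_ only requires the inner lists to be duplicate-free, i.e. to be valid encodings of the Python sets the function is typed over.
import Mathlib
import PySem

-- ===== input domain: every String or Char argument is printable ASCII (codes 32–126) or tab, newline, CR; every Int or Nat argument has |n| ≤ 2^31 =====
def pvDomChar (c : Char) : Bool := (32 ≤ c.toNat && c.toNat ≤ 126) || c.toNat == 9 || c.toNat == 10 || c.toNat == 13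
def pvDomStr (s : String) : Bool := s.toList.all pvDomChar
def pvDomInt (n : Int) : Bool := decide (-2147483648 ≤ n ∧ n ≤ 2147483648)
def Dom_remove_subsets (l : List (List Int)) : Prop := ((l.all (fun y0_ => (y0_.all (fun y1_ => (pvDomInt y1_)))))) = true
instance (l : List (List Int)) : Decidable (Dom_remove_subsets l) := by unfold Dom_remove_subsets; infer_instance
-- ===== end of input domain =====

-- B replaces A's restart-after-every-removal deletion loop by a single filtering pass
-- (keep a set unless it is a proper subset of some set, or equal to an earlier one): faster.


-- ===== PORT A =====
-- inner 'for j in range(i+1, len(result))' of A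
def rsScanJ (res : List (List Int)) (s1 : List Int) (i j : Nat) : Option Nat :=
  if h : j < res.length then
    let s2 := res[j]
    if PySem.Set.equal s1 s2 then some j
    else if decide (PySem.Set.len s1 < PySem.Set.len s2) && PySem.Set.issubset s1 s2 then some i
    else if decide (PySem.Set.len s2 < PySem.Set.len s1) && PySem.Set.issubset s2 s1 then some j
    else rsScanJ res s1 i (j + 1)
  else none
termination_by res.length - j

-- outer 'for i in range(len(result))' of A: the index popped this sweep, if any
def rsScanI (res : List (List Int)) (i : Nat) : Option Nat :=
  if h : i < res.length then
    match rsScanJ res res[i] i (i + 1) with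
    | some k => some k
    | none => rsScanI res (i + 1)
  else none
termination_by res.length - i

-- needed by rsLoop's termination proof
theorem rsScanJ_lt (res : List (List Int)) (s1 : List Int) (i j k : Nat)
    (h : rsScanJ res s1 i j = some k) : k < res.length ∨ k = i := by
  fun_induction rsScanJ res s1 i j <;> simp_all <;> omega

theorem rsScanI_lt (res : List (List Int)) (i k : Nat)
    (h : rsScanI res i = some k) : k < res.length := by
  fun_induction rsScanI res i with
  | case1 i hi s hs =>
    simp only [Option.some.injEq] at h
    subst h
    rcases rsScanJ_lt res res[i] i (i + 1) s hs with h' | h'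
    · exact h'
    · omega
  | case2 _ _ _ ih => exact ih h
  | case3 => simp_all

-- the 'while' loop of A: each pop restarts the double scan
def rsLoop (res : List (List Int)) : List (List Int) :=
  if res.length ≠ 0 then
    match h : rsScanI res 0 with
    | some k => rsLoop (res.eraseIdx k)
    | none => res
  else res
termination_by res.length
decreasing_by
  have hk := rsScanI_lt res 0 k h
  rw [List.length_eraseIdx, if_pos hk]
  omega

def remove_subsets (l : List (List Int)) : List (List Int) := rsLoop l

-- ===== PORT B =====
-- 'len(s) < len(t) and s.issubset(t)' (proper subset)
def altPsub (s t : List Int) : Bool :=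
  decide (PySem.Set.len s < PySem.Set.len t) && PySem.Set.issubset s t

-- B's single pass: 'seen' is the already-traversed prefix
def altGo (l : List (List Int)) (seen : List (List Int)) : List (List Int) → List (List Int)
  | [] => []
  | s :: rest =>
    if l.any (fun t => altPsub s t) || seen.any (fun t => PySem.Set.equal s t) then
      altGo l (seen ++ [s]) rest
    else
      s :: altGo l (seen ++ [s]) rest

def remove_subsets_alt (l : List (List Int)) : List (List Int) := altGo l [] l

-- ===== PRECONDITION & SPEC =====
-- Pre_ requires each inner list to be duplicate-free: the inner lists encode Python sets
-- (py type set[int]), which by the type convention are lists of DISTINCT elements; a list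
-- with repeated elements encodes no Python set, and on such lists the length-based subset
-- tests of both ports lose their set meaning.
def Pre_remove_subsets (l : List (List Int)) : Prop := ∀ s ∈ l, s.Nodup
instance (l : List (List Int)) : Decidable (Pre_remove_subsets l) := by
  unfold Pre_remove_subsets; infer_instance

def pvWitness_remove_subsets : List (List Int) := [[1, 2], [2], [3], [3]]

def Spec_remove_subsets (l : List (List Int)) (out : List (List Int)) : Prop := out = remove_subsets_alt l
instance (l : List (List Int)) (out : List (List Int)) : Decidable (Spec_remove_subsets l out) := by unfold Spec_remove_subsets; infer_instance

-- ===== CLAIM (what is proved, stated in full; the proofs are below) =====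
def Claim_equal_remove_subsets : Prop := ∀ (l : List (List Int)), Dom_remove_subsets l → Pre_remove_subsets l → Spec_remove_subsets l (remove_subsets l)

-- ===== LEMMAS AND PROOFS =====

theorem eq_iff (s t : List Int) :
    PySem.Set.equal s t = true ↔ (∀ x ∈ s, x ∈ t) ∧ (∀ x ∈ t, x ∈ s) := by
  simp [PySem.Set.equal]

theorem psub_iff (s t : List Int) :
    altPsub s t = true ↔ s.length < t.length ∧ ∀ x ∈ s, x ∈ t := by
  simp [altPsub, PySem.Set.len]

theorem psub_irrefl (s : List Int) : altPsub s s = false := by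
  simp [altPsub, PySem.Set.len]

theorem psub_trans {s c t : List Int} (h1 : altPsub s c = true) (h2 : altPsub c t = true) :
    altPsub s t = true := by
  rw [psub_iff] at *
  exact ⟨h1.1.trans h2.1, fun x hx => h2.2 x (h1.2 x hx)⟩

theorem equal_symm {s t : List Int} (h : PySem.Set.equal s t = true) :
    PySem.Set.equal t s = true := by
  rw [eq_iff] at *; exact ⟨h.2, h.1⟩

theorem equal_trans {s c a : List Int} (h1 : PySem.Set.equal s c = true)
    (h2 : PySem.Set.equal c a = true) : PySem.Set.equal s a = true := by
  rw [eq_iff] at *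
  exact ⟨fun x hx => h2.1 x (h1.1 x hx), fun x hx => h1.2 x (h2.2 x hx)⟩

theorem equal_length {s t : List Int} (hs : s.Nodup) (ht : t.Nodup)
    (h : PySem.Set.equal s t = true) : s.length = t.length := by
  rw [eq_iff] at h
  exact Nat.le_antisymm (hs.subperm h.1).length_le (ht.subperm h.2).length_le

-- equal sets have equal proper supersets / subsets (needs distinct elements for the lengths)
theorem psub_congr_right {s c a : List Int} (hc : c.Nodup) (ha : a.Nodup)
    (he : PySem.Set.equal c a = true) (hp : altPsub s c = true) : altPsub s a = true := by
  rw [psub_iff] at *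
  rw [eq_iff] at he
  exact ⟨(equal_length hc ha (by rw [eq_iff]; exact he) ▸ hp.1),
    fun x hx => he.1 x (hp.2 x hx)⟩

theorem psub_congr_left {s c t : List Int} (hs : s.Nodup) (hc : c.Nodup)
    (he : PySem.Set.equal s c = true) (hp : altPsub c t = true) : altPsub s t = true := by
  rw [psub_iff] at *
  rw [eq_iff] at he
  exact ⟨(equal_length hs hc (by rw [eq_iff]; exact he)) ▸ hp.1,
    fun x hx => hp.2 x (he.1 x hx)⟩

theorem go_append (l seen xs ys : List (List Int)) :
    altGo l seen (xs ++ ys) = altGo l seen xs ++ altGo l (seen ++ xs) ys := by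
  induction xs generalizing seen with
  | nil => simp [altGo]
  | cons s rest ih =>
    simp only [List.cons_append, altGo]
    split
    · rw [ih]; simp
    · rw [ih]; simp

theorem go_congr (l1 l2 seen1 seen2 xs : List (List Int))
    (H : ∀ s ∈ xs, (l1.any (fun t => altPsub s t) || seen1.any (fun t => PySem.Set.equal s t))
        = (l2.any (fun t => altPsub s t) || seen2.any (fun t => PySem.Set.equal s t))) :
    altGo l1 seen1 xs = altGo l2 seen2 xs := by
  induction xs generalizing seen1 seen2 with
  | nil => rfl
  | cons s rest ih =>
    have hH := H s (by simp)
    have hrest : ∀ t ∈ rest,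
        (l1.any (fun u => altPsub t u) || (seen1 ++ [s]).any (fun u => PySem.Set.equal t u))
        = (l2.any (fun u => altPsub t u) || (seen2 ++ [s]).any (fun u => PySem.Set.equal t u)) := by
      intro t ht
      have := H t (by simp [ht])
      cases h0 : PySem.Set.equal t s <;>
        simp only [List.any_append, List.any_cons, List.any_nil, h0, Bool.or_false,
          Bool.or_true, this]
    simp only [altGo, hH]
    split
    · exact ih (seen1 ++ [s]) (seen2 ++ [s]) hrest
    · rw [ih (seen1 ++ [s]) (seen2 ++ [s]) hrest]

theorem go_id (l seen xs : List (List Int))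
    (P : ∀ s ∈ xs, l.any (fun t => altPsub s t) = false)
    (Q : ∀ s ∈ xs, seen.any (fun t => PySem.Set.equal s t) = false)
    (R : List.Pairwise (fun a b => PySem.Set.equal b a = false) xs) :
    altGo l seen xs = xs := by
  induction xs generalizing seen with
  | nil => rfl
  | cons s rest ih =>
    have hc : (l.any (fun t => altPsub s t) || seen.any (fun t => PySem.Set.equal s t)) = false := by
      simp [P s (by simp), Q s (by simp)]
    simp only [altGo, hc, if_neg Bool.false_ne_true]
    rw [ih (seen ++ [s])
      (fun t ht => P t (by simp [ht]))
      (fun t ht => by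
        simp only [List.any_append, List.any_cons, List.any_nil, Q t (by simp [ht]),
          Bool.false_or, Bool.or_false]
        exact (List.pairwise_cons.mp R).1 t ht)
      (List.pairwise_cons.mp R).2]

-- characterisation of A's inner scan
theorem rsScanJ_none (res : List (List Int)) (s1 : List Int) (i j0 : Nat)
    (h : rsScanJ res s1 i j0 = none) :
    ∀ j, j0 ≤ j → ∀ hj : j < res.length,
      PySem.Set.equal s1 res[j] = false ∧ altPsub s1 res[j] = false ∧ altPsub res[j] s1 = false := by
  fun_induction rsScanJ res s1 i j0 with
  | case1 => simp_all
  | case2 => simp_all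
  | case3 => simp_all
  | case4 j1 hj1 s2 hne h1 h2 ih =>
    intro j hj hjlt
    rcases Nat.eq_or_lt_of_le hj with rfl | hlt
    · exact ⟨Bool.eq_false_iff.mpr hne, Bool.eq_false_iff.mpr h1, Bool.eq_false_iff.mpr h2⟩
    · exact ih h j hlt hjlt
  | case5 j1 hj1 => intro j hj hjlt; omega

theorem rsScanJ_spec (res : List (List Int)) (s1 : List Int) (i j0 k : Nat)
    (h : rsScanJ res s1 i j0 = some k) :
    ∃ j, ∃ hj : j < res.length, j0 ≤ j ∧
      ((PySem.Set.equal s1 res[j] = true ∧ k = j) ∨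
       (altPsub s1 res[j] = true ∧ k = i) ∨
       (altPsub res[j] s1 = true ∧ k = j)) := by
  fun_induction rsScanJ res s1 i j0 with
  | case1 j1 hj1 s2 heq =>
    exact ⟨j1, hj1, Nat.le_refl _, Or.inl ⟨by simpa using heq, by simpa using h.symm⟩⟩
  | case2 j1 hj1 s2 hne hp =>
    exact ⟨j1, hj1, Nat.le_refl _, Or.inr (Or.inl ⟨by simpa [altPsub] using hp, by simpa using h.symm⟩)⟩
  | case3 j1 hj1 s2 hne hp1 hp2 =>
    exact ⟨j1, hj1, Nat.le_refl _, Or.inr (Or.inr ⟨by simpa [altPsub] using hp2, by simpa using h.symm⟩)⟩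
  | case4 j1 hj1 s2 _ _ _ ih =>
    obtain ⟨j, hj, hle, hc⟩ := ih h
    exact ⟨j, hj, by omega, hc⟩
  | case5 => simp_all

theorem rsScanI_none (res : List (List Int)) (i0 : Nat) (h : rsScanI res i0 = none) :
    ∀ i, i0 ≤ i → ∀ hi : i < res.length, rsScanJ res res[i] i (i + 1) = none := by
  fun_induction rsScanI res i0 with
  | case1 => simp_all
  | case2 i1 hi1 hs ih =>
    intro i hi hilt
    rcases Nat.eq_or_lt_of_le hi with rfl | hlt
    · exact hs
    · exact ih h i hlt hilt
  | case3 => intro i hi hilt; omega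

theorem rsScanI_spec (res : List (List Int)) (i0 k : Nat) (h : rsScanI res i0 = some k) :
    ∃ i, ∃ hi : i < res.length, rsScanJ res res[i] i (i + 1) = some k := by
  fun_induction rsScanI res i0 with
  | case1 i1 hi1 s hs =>
    simp only [Option.some.injEq] at h
    exact ⟨i1, hi1, by rw [hs, h]⟩
  | case2 _ _ _ ih => exact ih h
  | case3 => simp_all

-- A found nothing to pop ⇒ B's filter keeps everything
theorem fixpoint_case (res : List (List Int)) (h : rsScanI res 0 = none) :
    altGo res [] res = res := by
  have hpair : ∀ i j (hi : i < res.length) (hj : j < res.length), i < j →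
      PySem.Set.equal res[i] res[j] = false ∧ altPsub res[i] res[j] = false ∧
      altPsub res[j] res[i] = false := by
    intro i j hi hj hij
    exact rsScanJ_none res res[i] i (i + 1) (rsScanI_none res 0 h i (Nat.zero_le _) hi) j
      (by omega) hj
  apply go_id
  · intro s hs
    obtain ⟨i, hi, rfl⟩ := List.mem_iff_getElem.mp hs
    rw [List.any_eq_false]
    intro t ht
    obtain ⟨j, hj, rfl⟩ := List.mem_iff_getElem.mp ht
    rw [Bool.not_eq_true]
    rcases Nat.lt_trichotomy i j with hij | hij | hij
    · exact (hpair i j hi hj hij).2.1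
    · subst hij; exact psub_irrefl _
    · exact (hpair j i hj hi hij).2.2
  · simp
  · rw [List.pairwise_iff_getElem]
    intro i j hi hj hij
    cases h2 : PySem.Set.equal res[j] res[i]
    · rfl
    · exact absurd (equal_symm h2) (by simp [(hpair i j hi hj hij).1])

theorem eraseIdx_take_drop (l : List (List Int)) : ∀ k, l.eraseIdx k = l.take k ++ l.drop (k + 1) := by
  induction l with
  | nil => intro k; simp
  | cons a t ih => intro k; cases k <;> simp [List.eraseIdx, ih]

-- A pops index k ⇒ B's filter result is unchanged
theorem step_case (res : List (List Int)) (k : Nat) (hk : k < res.length)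
    (pre : ∀ s ∈ res, s.Nodup)
    (hyp : (∃ i, ∃ hi : i < res.length, i < k ∧ PySem.Set.equal res[i] res[k] = true) ∨
           (∃ m, ∃ hm : m < res.length, m ≠ k ∧ altPsub res[k] res[m] = true)) :
    altGo (res.eraseIdx k) [] (res.eraseIdx k) = altGo res [] res := by
  set u := res.take k with hu
  set v := res.drop (k + 1) with hv
  set c := res[k] with hc
  have hsplit : res = u ++ c :: v := by
    rw [hu, hv, hc]
    conv_lhs => rw [← List.take_append_drop k res]
    congr 1
    exact List.drop_eq_getElem_cons hk
  have herase : res.eraseIdx k = u ++ v := by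
    rw [eraseIdx_take_drop, hu, hv]
  -- the popped element survives in u++v in strengthened form
  have hwitness : (∃ a ∈ u, PySem.Set.equal c a = true) ∨ (∃ t ∈ u ++ v, altPsub c t = true) := by
    rcases hyp with ⟨i, hi, hik, he⟩ | ⟨m, hm, hmk, hp⟩
    · left
      exact ⟨res[i], by rw [hu]; exact List.mem_take_iff_getElem.mpr ⟨i, by omega, rfl⟩,
        equal_symm he⟩
    · right
      refine ⟨res[m], ?_, hp⟩
      rcases Nat.lt_or_gt_of_ne hmk with hlt | hgt
      · exact List.mem_append_left _ (List.mem_take_iff_getElem.mpr ⟨m, by omega, rfl⟩)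
      · apply List.mem_append_right
        have : res[m] = (res.drop (k + 1))[m - (k + 1)]'(by simp; omega) := by
          simp [List.getElem_drop]; congr 1; omega
        rw [this]; exact List.getElem_mem _
    -- nodups
  have hnc : c.Nodup := pre c (by rw [hsplit]; simp)
  have hmemuv : ∀ t ∈ u ++ v, t ∈ res := by
    intro t ht; rw [hsplit]; rcases List.mem_append.mp ht with h' | h' <;> simp [h']
  -- any element properly below c is properly below something in u ++ v
  have hkey : ∀ s ∈ res, altPsub s c = true → (u ++ v).any (fun t => altPsub s t) = true := by
    intro s hs hp
    rcases hwitness with ⟨a, ha, he⟩ | ⟨t, ht, hpt⟩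
    · exact List.any_eq_true.mpr ⟨a, List.mem_append_left _ ha,
        psub_congr_right hnc (pre a (hmemuv a (List.mem_append_left _ ha))) he hp⟩
    · exact List.any_eq_true.mpr ⟨t, ht, psub_trans hp hpt⟩
  have hkey2 : ∀ s ∈ res, PySem.Set.equal s c = true →
      ((u ++ v).any (fun t => altPsub s t) || u.any (fun t => PySem.Set.equal s t)) = true := by
    intro s hs he
    rcases hwitness with ⟨a, ha, hea⟩ | ⟨t, ht, hpt⟩
    · refine Bool.or_eq_true_iff.mpr (Or.inr (List.any_eq_true.mpr ⟨a, ha, equal_trans he hea⟩))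
    · exact Bool.or_eq_true_iff.mpr (Or.inl (List.any_eq_true.mpr ⟨t, ht,
        psub_congr_left (pre s hs) hnc he hpt⟩))
  -- the full-list subset test is unchanged by the pop
  have hany : ∀ s ∈ res, res.any (fun t => altPsub s t) = (u ++ v).any (fun t => altPsub s t) := by
    intro s hs
    conv_lhs => rw [hsplit]
    cases hsc : altPsub s c
    · simp [List.any_append, hsc]
    · simp [List.any_append, hsc, hkey s hs hsc, Bool.or_comm]
  -- now compute both sides
  have hrhs : altGo res [] res = altGo res [] u ++ altGo res ([] ++ u) (c :: v) :=
    (congrArg (altGo res []) hsplit).trans (go_append res [] u (c :: v))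
  have hlhs : altGo (u ++ v) [] (u ++ v)
      = altGo (u ++ v) [] u ++ altGo (u ++ v) ([] ++ u) v := go_append (u ++ v) [] u v
  have hcdrop : (res.any (fun t => altPsub c t) || u.any (fun t => PySem.Set.equal c t)) = true := by
    rcases hwitness with ⟨a, ha, he⟩ | ⟨t, ht, hpt⟩
    · exact Bool.or_eq_true_iff.mpr (Or.inr (List.any_eq_true.mpr ⟨a, ha, he⟩))
    · exact Bool.or_eq_true_iff.mpr (Or.inl (List.any_eq_true.mpr ⟨t, hmemuv t ht, hpt⟩))
  have hgo1 : altGo (u ++ v) [] u = altGo res [] u := by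
    apply go_congr
    intro s hs
    rw [hany s (by rw [hsplit]; simp [hs])]
  have hgo2 : altGo (u ++ v) ([] ++ u) v = altGo res ([] ++ u) (c :: v) := by
    simp only [List.nil_append]
    have : altGo res u (c :: v) = altGo res (u ++ [c]) v := by
      simp only [altGo]
      rw [if_pos]
      simpa using hcdrop
    rw [this]
    apply go_congr
    intro s hsv
    have hsres : s ∈ res := by rw [hsplit]; simp [hsv]
    have hseen : (u ++ [c]).any (fun t => PySem.Set.equal s t)
        = (u.any (fun t => PySem.Set.equal s t) || PySem.Set.equal s c) := by
      simp [List.any_append]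
    rw [hany s hsres, hseen]
    cases hsc : PySem.Set.equal s c
    · simp
    · simp only [Bool.or_true]
      exact hkey2 s hsres hsc
  rw [herase, hlhs, hgo1, hgo2, ← hrhs]

theorem main_loop : ∀ n res, res.length ≤ n → (∀ s ∈ res, List.Nodup s) →
    rsLoop res = altGo res [] res := by
  intro n
  induction n with
  | zero =>
    intro res hlen _
    have : res = [] := List.eq_nil_of_length_eq_zero (by omega)
    subst this
    rw [rsLoop]; rfl
  | succ n ih =>
    intro res hlen pre
    rw [rsLoop]
    by_cases h0 : res.length ≠ 0
    · rw [if_pos h0]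
      split
      case h_2 h => exact (fixpoint_case res h).symm
      case h_1 k h =>
        have hk := rsScanI_lt res 0 k h
        have hlen' : (res.eraseIdx k).length ≤ n := by
          rw [List.length_eraseIdx]; simp [hk]; omega
        have pre' : ∀ s ∈ res.eraseIdx k, s.Nodup :=
          fun s hs => pre s (List.mem_of_mem_eraseIdx hs)
        rw [ih (res.eraseIdx k) hlen' pre']
        -- characterise which index was popped
        obtain ⟨i, hi, hj⟩ := rsScanI_spec res 0 k h
        obtain ⟨j, hjlt, hij, hcase⟩ := rsScanJ_spec res res[i] i (i + 1) k hj
        apply step_case res k hk pre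
        rcases hcase with ⟨he, rfl⟩ | ⟨hp, rfl⟩ | ⟨hp, rfl⟩
        · exact Or.inl ⟨i, hi, by omega, he⟩
        · exact Or.inr ⟨j, hjlt, by omega, hp⟩
        · exact Or.inr ⟨i, hi, by omega, hp⟩
    · rw [if_neg h0]
      rw [not_not] at h0
      have : res = [] := List.eq_nil_of_length_eq_zero h0
      subst this; rfl

-- ===== VERDICT (by name: the statement is the Claim_ definition above) =====
theorem remove_subsets_spec : Claim_equal_remove_subsets := by
  intro l _ pre
  unfold Spec_remove_subsets remove_subsets remove_subsets_alt
  exact main_loop l.length l (Nat.le_refl _) pre
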